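-- pv_equiv track=rewrite | github.com/mwatkins1970/leilan3discordbot | chapter2/message_formats.py | parse_repl_log
-- ===== SOURCE A (Python) =====
-- def parse_repl_log(log_text):
--     sections = []
--     current_user_section = []
--     current_interpreter_section = []
--
--     lines = log_text.split("\n")
--     for line in lines:
--         if line.startswith(">>> ") or line.startswith("... "):
--             if current_interpreter_section:
--                 interpreter_text = "\n".join(current_interpreter_section)
--                 if (
--                     interpreter_text.strip()
--                 ):  # Check if the interpreter section is not empty
--                     sections.append(("interpreter", interpreter_text))
--                 current_interpreter_section = []
--             current_user_section.append(line[4:])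
--         else:
--             if current_user_section:
--                 sections.append(("user", "\n".join(current_user_section)))
--                 current_user_section = []
--             current_interpreter_section.append(line)
--
--     # Append any remaining sections
--     if current_user_section:
--         sections.append(("user", "\n".join(current_user_section)))
--     if current_interpreter_section:
--         interpreter_text = "\n".join(current_interpreter_section)
--         if interpreter_text.strip():  # Check if the interpreter section is not empty
--             sections.append(("interpreter", interpreter_text))
--
--     return sections
-- ===== SOURCE B (Python) =====
-- def parse_repl_log(log_text):
--     # Two-phase: group consecutive same-kind lines into runs (built back to front),
--     # then format each run; no flush-on-change state machine.
--     lines = log_text.split("\n")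
--
--     def is_user(line):
--         return line.startswith(">>> ") or line.startswith("... ")
--
--     runs = []
--     for line in reversed(lines):
--         k = is_user(line)
--         if runs and runs[0][0] == k:
--             runs[0] = (k, [line] + runs[0][1])
--         else:
--             runs.insert(0, (k, [line]))
--
--     sections = []
--     for k, run in runs:
--         if k:
--             sections.append(("user", "\n".join(l[4:] for l in run)))
--         else:
--             text = "\n".join(run)
--             if text.strip():
--                 sections.append(("interpreter", text))
--     return sections
-- ===== Notes on version B (the rewrite author's own statement) =====
-- stated objective: alternative
-- what changed: Replaced A's flush-on-change state machine (two pending buffers flushed whenever the line kind switches, plus a trailing flush) by a two-phase pass: first group consecutive same-kind lines into runs, then format each run (user runs always kept, interpreter runs kept only if their joined text strips non-empty).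
import Mathlib
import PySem

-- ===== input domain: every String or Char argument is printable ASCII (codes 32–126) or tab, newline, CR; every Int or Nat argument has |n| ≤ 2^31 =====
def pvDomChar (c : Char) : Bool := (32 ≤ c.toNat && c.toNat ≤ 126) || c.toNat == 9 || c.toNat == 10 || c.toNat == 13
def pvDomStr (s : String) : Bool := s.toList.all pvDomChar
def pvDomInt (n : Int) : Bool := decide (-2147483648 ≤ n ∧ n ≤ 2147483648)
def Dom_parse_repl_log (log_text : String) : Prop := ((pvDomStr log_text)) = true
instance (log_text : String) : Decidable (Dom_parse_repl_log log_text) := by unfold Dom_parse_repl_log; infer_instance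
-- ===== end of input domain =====

-- B replaces A's flush-on-change state machine by a two-phase pass (group consecutive
-- same-kind lines into runs, then format each run); objective: alternative decomposition.


-- ===== PORT A =====
-- A's loop body: state = (sections, current_user_section, current_interpreter_section)
def stepA (st : List (String × String) × List String × List String) (line : String) :
    List (String × String) × List String × List String :=
  match st with
  | (sections, cu, ci) =>
    if PySem.Str.startswith line ">>> " || PySem.Str.startswith line "... " then
      let (sections, ci) :=
        if ci ≠ [] then
          let interpreter_text := PySem.Str.join "\n" ci
          (if PySem.Str.strip interpreter_text ≠ "" then
             sections ++ [("interpreter", interpreter_text)] else sections, ([] : List String))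
        else (sections, ci)
      (sections, cu ++ [PySem.Str.slice line (some 4) none], ci)
    else
      let (sections, cu) :=
        if cu ≠ [] then (sections ++ [("user", PySem.Str.join "\n" cu)], ([] : List String))
        else (sections, cu)
      (sections, cu, ci ++ [line])

def parse_repl_log (log_text : String) : List (String × String) :=
  let lines := (PySem.Str.split? log_text "\n").getD []  -- sep "\n" ≠ "": split? is always `some` here
  match lines.foldl stepA ([], [], []) with
  | (sections, cu, ci) =>
    let sections := if cu ≠ [] then sections ++ [("user", PySem.Str.join "\n" cu)] else sections
    if ci ≠ [] then
      let interpreter_text := PySem.Str.join "\n" ci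
      if PySem.Str.strip interpreter_text ≠ "" then sections ++ [("interpreter", interpreter_text)]
      else sections
    else sections

-- ===== PORT B =====
def isUserB (line : String) : Bool :=
  PySem.Str.startswith line ">>> " || PySem.Str.startswith line "... "

-- prepend one line to the run list (Source B builds the runs back to front)
def mergeRunB (k : Bool) (line : String) (runs : List (Bool × List String)) :
    List (Bool × List String) :=
  match runs with
  | (k', r) :: rest => if k' = k then (k, line :: r) :: rest else (k, [line]) :: (k', r) :: rest
  | [] => [(k, [line])]

def parse_repl_log_alt (log_text : String) : List (String × String) :=
  let lines := (PySem.Str.split? log_text "\n").getD []  -- sep "\n" ≠ "": split? is always `some` here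
  let runs := lines.foldr (fun line runs => mergeRunB (isUserB line) line runs) []
  runs.foldl (fun sections p =>
    if p.1 then
      sections ++ [("user", PySem.Str.join "\n" (p.2.map (fun l => PySem.Str.slice l (some 4) none)))]
    else
      let text := PySem.Str.join "\n" p.2
      if PySem.Str.strip text ≠ "" then sections ++ [("interpreter", text)] else sections) []

-- ===== PRECONDITION & SPEC =====
def Spec_parse_repl_log (log_text : String) (out : List (String × String)) : Prop := out = parse_repl_log_alt log_text
instance (log_text : String) (out : List (String × String)) : Decidable (Spec_parse_repl_log log_text out) := by unfold Spec_parse_repl_log; infer_instance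

-- ===== CLAIM (what is proved, stated in full; the proofs are below) =====
def Claim_equal_parse_repl_log : Prop := ∀ (log_text : String), Dom_parse_repl_log log_text → Spec_parse_repl_log log_text (parse_repl_log log_text)

-- ===== LEMMAS AND PROOFS =====

-- what one run contributes to the output
def emitRun (p : Bool × List String) : List (String × String) :=
  if p.1 then
    [("user", PySem.Str.join "\n" (p.2.map (fun l => PySem.Str.slice l (some 4) none)))]
  else
    let text := PySem.Str.join "\n" p.2
    if PySem.Str.strip text ≠ "" then [("interpreter", text)] else []

-- A's (cu, ci) state corresponding to a pending run of kind k with raw lines acc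
def pendState (k : Bool) (acc : List String) : List String × List String :=
  if k then (acc.map (fun l => PySem.Str.slice l (some 4) none), []) else ([], acc)

-- A's final flush
def finishA (st : List (String × String) × List String × List String) : List (String × String) :=
  match st with
  | (sections, cu, ci) =>
    let sections := if cu ≠ [] then sections ++ [("user", PySem.Str.join "\n" cu)] else sections
    if ci ≠ [] then
      let interpreter_text := PySem.Str.join "\n" ci
      if PySem.Str.strip interpreter_text ≠ "" then sections ++ [("interpreter", interpreter_text)]
      else sections
    else sections

-- merging a whole pending run (proof-side generalisation of mergeRunB)
def mergeAcc (k : Bool) (acc : List String) (runs : List (Bool × List String)) :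
    List (Bool × List String) :=
  match runs with
  | (k', r) :: rest => if k' = k then (k, acc ++ r) :: rest else (k, acc) :: (k', r) :: rest
  | [] => [(k, acc)]

theorem mergeRunB_eq_mergeAcc (k : Bool) (l : String) (runs : List (Bool × List String)) :
    mergeRunB k l runs = mergeAcc k [l] runs := by
  cases runs with
  | nil => rfl
  | cons p rest => cases p; simp [mergeRunB, mergeAcc]

theorem mergeAcc_mergeAcc (k : Bool) (acc : List String) (l : String)
    (runs : List (Bool × List String)) :
    mergeAcc k acc (mergeAcc k [l] runs) = mergeAcc k (acc ++ [l]) runs := by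
  cases runs with
  | nil => simp [mergeAcc]
  | cons p rest => cases p with | mk k' r => by_cases h : k' = k <;> simp [mergeAcc, h]

theorem mergeAcc_ne (k j : Bool) (acc : List String) (l : String)
    (runs : List (Bool × List String)) (h : j ≠ k) :
    mergeAcc k acc (mergeAcc j [l] runs) = (k, acc) :: mergeAcc j [l] runs := by
  cases runs with
  | nil => simp [mergeAcc, h]
  | cons p rest => cases p with | mk k' r => by_cases h' : k' = j <;> simp [mergeAcc, h, h']

theorem isUserB_eq (l : String) :
    (PySem.Str.startswith l ">>> " || PySem.Str.startswith l "... ") = isUserB l := rfl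

theorem finishA_pend (secs : List (String × String)) (k : Bool) (acc : List String)
    (hacc : acc ≠ []) :
    finishA (secs, pendState k acc) = secs ++ emitRun (k, acc) := by
  cases k with
  | true =>
      have hm : acc.map (fun l => PySem.Str.slice l (some 4) none) ≠ [] := by
        simpa using hacc
      simp only [finishA, pendState, emitRun]
      simp [hm]
  | false =>
      simp only [finishA, pendState, emitRun]
      split_ifs <;> simp_all

theorem stepA_pend (secs : List (String × String)) (k : Bool) (acc : List String)
    (hacc : acc ≠ []) (l : String) :
    stepA (secs, pendState k acc) l =
      if isUserB l = k then (secs, pendState k (acc ++ [l]))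
      else (secs ++ emitRun (k, acc), pendState (isUserB l) [l]) := by
  cases k with
  | true =>
      have hm : acc.map (fun l => PySem.Str.slice l (some 4) none) ≠ [] := by
        simpa using hacc
      cases hu : isUserB l with
      | true =>
          simp only [stepA, isUserB_eq, hu]
          simp [pendState]
      | false =>
          simp only [stepA, isUserB_eq, hu, pendState, emitRun]
          simp [hm]
  | false =>
      cases hu : isUserB l with
      | true =>
          simp only [stepA, isUserB_eq, hu, pendState, emitRun]
          split_ifs <;> simp_all
      | false =>
          simp only [stepA, isUserB_eq, hu]
          simp [pendState]

theorem main_invariant (lines : List String) :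
    ∀ (secs : List (String × String)) (k : Bool) (acc : List String), acc ≠ [] →
    finishA (lines.foldl stepA (secs, pendState k acc)) =
      secs ++ (mergeAcc k acc (lines.foldr (fun l r => mergeRunB (isUserB l) l r) [])).flatMap emitRun := by
  induction lines with
  | nil =>
      intro secs k acc hacc
      simp [mergeAcc, List.flatMap, finishA_pend secs k acc hacc]
  | cons l ls ih =>
      intro secs k acc hacc
      simp only [List.foldl_cons, List.foldr_cons, stepA_pend secs k acc hacc l,
        mergeRunB_eq_mergeAcc (isUserB l) l]
      by_cases h : isUserB l = k
      · subst h
        rw [if_pos rfl, ih secs (isUserB l) (acc ++ [l]) (by simp),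
          mergeAcc_mergeAcc]
      · rw [if_neg h, ih _ (isUserB l) [l] (by simp),
          mergeAcc_ne k (isUserB l) acc l _ h]
        simp [List.flatMap]

theorem foldl_emit (runs : List (Bool × List String)) (init : List (String × String)) :
    runs.foldl (fun sections p =>
      if p.1 then
        sections ++ [("user", PySem.Str.join "\n" (p.2.map (fun l => PySem.Str.slice l (some 4) none)))]
      else
        let text := PySem.Str.join "\n" p.2
        if PySem.Str.strip text ≠ "" then sections ++ [("interpreter", text)] else sections) init
    = init ++ runs.flatMap emitRun := by
  induction runs generalizing init with
  | nil => simp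
  | cons p rest ih =>
      cases p with
      | mk k r =>
        cases k <;>
          simp only [List.foldl_cons, List.flatMap_cons, ih, emitRun] <;>
          split_ifs <;> simp_all

theorem ports_agree (log_text : String) :
    parse_repl_log log_text = parse_repl_log_alt log_text := by
  unfold parse_repl_log parse_repl_log_alt
  rw [foldl_emit]
  cases hl : (PySem.Str.split? log_text "\n").getD [] with
  | nil => rfl
  | cons l ls =>
      have hstep : stepA ([], [], []) l = ([], pendState (isUserB l) [l]) := by
        cases hu : isUserB l <;> (simp only [stepA, isUserB_eq, hu]; simp [pendState])
      show finishA (List.foldl stepA ([], [], []) (l :: ls)) = _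
      rw [List.foldl_cons, hstep]
      rw [main_invariant ls [] (isUserB l) [l] (by simp)]
      simp only [List.foldr_cons, mergeRunB_eq_mergeAcc, List.nil_append]

-- ===== VERDICT (by name: the statement is the Claim_ definition above) =====
theorem parse_repl_log_spec : Claim_equal_parse_repl_log := by
  intro log_text _
  unfold Spec_parse_repl_log
  exact ports_agree log_text
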